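-- pv_equiv track=rewrite | github.com/micheloosterhof/aldegonde | src/aldegonde/stats/isomorph.py | isomorph
-- ===== SOURCE A (Python) =====
-- from collections.abc import Sequence
-- from typing import TypeVar
--
-- T = TypeVar("T")
--
-- def isomorph(text: Sequence[T]) -> str:
--     """Input is a piece of text as a sequence
--     Output is this normalized as an isomorph, as a string in alphabet A-Z
--     Example ATTACK and EFFECT both normalize to ABBACD
--     TODO: raise exception when we go beyond Z.
--     """
--     output: str = ""
--     letter: str = "A"
--     mapping: dict[str, str] = {}
--     for rune in text:
--         if str(rune) not in mapping:
--             mapping[str(rune)] = letter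
--             letter = chr(ord(letter) + 1)
--         output = output + mapping[str(rune)]
--     return output
-- ===== SOURCE B (Python) =====
-- def isomorph(text):
--     """Rank-by-sorting: sort the distinct symbols by first position, rank = letter."""
--     keys = [str(r) for r in text]
--     rank = {k: j for j, k in enumerate(sorted(set(keys), key=keys.index))}
--     return "".join(chr(65 + rank[k]) for k in keys)
-- ===== Notes on version B (the rewrite author's own statement) =====
-- stated objective: alternative
-- what changed: A assigns letters by incrementing a letter counter inside a single interleaved build-and-emit loop; B instead sorts the distinct symbols by their first position (sorted(set(keys), key=keys.index)) and uses each symbol's rank in that order as its letter, then translates in a separate pass.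
import Mathlib
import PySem

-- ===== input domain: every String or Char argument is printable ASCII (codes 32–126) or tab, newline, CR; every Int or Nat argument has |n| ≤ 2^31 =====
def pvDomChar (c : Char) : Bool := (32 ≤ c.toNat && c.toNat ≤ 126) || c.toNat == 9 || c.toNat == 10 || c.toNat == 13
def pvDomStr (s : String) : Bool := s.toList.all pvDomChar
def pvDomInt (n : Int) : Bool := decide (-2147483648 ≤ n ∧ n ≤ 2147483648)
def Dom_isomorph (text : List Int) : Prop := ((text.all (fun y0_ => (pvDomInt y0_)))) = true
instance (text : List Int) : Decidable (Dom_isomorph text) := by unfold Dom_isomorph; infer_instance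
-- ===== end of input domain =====

-- B replaces A's incremental letter counter with a rank-by-sorting scheme: the distinct symbols are
-- sorted by their first position and each symbol's letter is its rank; objective: alternative.

-- ===== PORT A =====
-- Python's one-character strings (`letter` and the values of `mapping`) are represented as Char;
-- chr/ord are Char.ofNat/Char.toNat (exact for every code point reached under Pre_); the growing
-- output string is carried as List Char and wrapped by String.ofList at the end (Lean's own String
-- append is kernel-opaque).
def isoStepA (st : List Char × Char × PySem.Dict String Char) (rune : Int) :
    List Char × Char × PySem.Dict String Char :=
  match st with
  | (output, letter, mapping) =>
    let s := PySem.Int.toStr rune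
    if (PySem.Dict.get? mapping s).isNone then
      -- if str(rune) not in mapping: mapping[str(rune)] = letter; letter = chr(ord(letter) + 1)
      let mapping' := PySem.Dict.insert mapping s letter
      (output ++ [PySem.Dict.getD mapping' s 'A'], Char.ofNat (letter.toNat + 1), mapping')
    else
      -- output = output + mapping[str(rune)]
      (output ++ [PySem.Dict.getD mapping s 'A'], letter, mapping)

def isomorph (text : List Int) : String :=
  String.ofList (text.foldl isoStepA ([], 'A', PySem.Dict.empty)).1

-- ===== PORT B =====
-- keys = [str(r) for r in text]
-- rank = {k: j for j, k in enumerate(sorted(set(keys), key=keys.index))}   -- keys.index k always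
--   succeeds (k ∈ keys), ported as (index? …).getD 0; the sort key is injective on set(keys), so the
--   sorted result does not depend on the set's iteration order
-- return "".join(chr(65 + rank[k]) for k in keys)
def isomorph_alt (text : List Int) : String :=
  let keys : List String := text.map PySem.Int.toStr
  let order : List String :=
    PySem.List.sorted (PySem.Set.ofList keys) (fun k => (PySem.List.index? keys k).getD 0) false
  let rank : PySem.Dict String Int :=
    PySem.Dict.ofList ((PySem.List.enumerate order).map (fun p => (p.2, p.1)))
  String.ofList (keys.map (fun k => Char.ofNat (65 + (PySem.Dict.getD rank k 0).toNat)))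

-- ===== PRECONDITION & SPEC =====
-- Pre_ excludes inputs with more than 55231 distinct runes: there the Python (both A and B, which
-- agree) returns a string containing lone-surrogate code points past chr(0xD7FF), which is not a
-- representable Lean String value (Char has no surrogates), so no Lean-level claim can cover it.
def Pre_isomorph (text : List Int) : Prop :=
  (PySem.List.dedup (text.map PySem.Int.toStr)).length ≤ 55231
instance (text : List Int) : Decidable (Pre_isomorph text) := by unfold Pre_isomorph; infer_instance

def pvWitness_isomorph : List Int := [3, 7, 7, 3, 1, 2]

def Spec_isomorph (text : List Int) (out : String) : Prop := out = isomorph_alt text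
instance (text : List Int) (out : String) : Decidable (Spec_isomorph text out) := by unfold Spec_isomorph; infer_instance

-- ===== CLAIM (what is proved, stated in full; the proofs are below) =====
def Claim_equal_isomorph : Prop := ∀ (text : List Int), Dom_isomorph text → Pre_isomorph text → Spec_isomorph text (isomorph text)

-- ===== LEMMAS AND PROOFS =====

-- the first-occurrence code table over `seen`, with value `f i` at the i-th distinct symbol:
-- f = (Char.ofNat <| 65 + ·.toNat) gives A's `mapping`, f = id gives B's `rank`
def codes {ν : Type} (f : Int → ν) (seen : List String) : PySem.Dict String ν :=
  PySem.Dict.ofList ((PySem.List.enumerate seen).map (fun p => (p.2, f p.1)))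

theorem toNat_ofNat_valid (n : Nat) (h : n < 55296) : (Char.ofNat n).toNat = n := by
  simp [Char.ofNat, Nat.isValidChar, h]

theorem items_codes {ν : Type} (f : Int → ν) (seen : List String) (hnd : seen.Nodup) :
    (codes f seen).items
      = (PySem.List.enumerate seen).map (fun p => (p.2, f p.1)) := by
  have h := PySem.Dict.items_foldl_insert_fresh
      ((PySem.List.enumerate seen).map (fun p => (p.2, f p.1)))
      (fun q => q.1) (fun q => q.2) (PySem.Dict.empty)
      (by intro a _; exact PySem.Dict.contains_empty _)
      (by
        have : ((PySem.List.enumerate seen).map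
            (fun p => (p.2, f p.1))).map (fun q => q.1) = seen := by
          simp [List.map_map]
          exact PySem.List.map_snd_enumerate seen 0
        rw [this]; exact hnd)
  simpa [codes, PySem.Dict.ofList, PySem.Dict.update] using h

theorem codes_snoc {ν : Type} (f : Int → ν) (seen : List String) (s : String)
    (hs : s ∉ seen) (hnd : seen.Nodup) :
    codes f (seen ++ [s]) = (codes f seen).insert s (f seen.length) := by
  have hnd' : (seen ++ [s]).Nodup := by
    simp [List.nodup_append, hnd]
    exact fun a ha h => hs (h ▸ ha)
  have hcont : (codes f seen).contains s = false := by
    have hk : (codes f seen).keys = seen := by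
      show ((codes f seen).items).map (fun p => p.1) = seen
      rw [items_codes f seen hnd]
      simp [List.map_map]
      exact PySem.List.map_snd_enumerate seen 0
    rw [PySem.Dict.contains_eq_decide_mem_keys, hk]
    simp [hs]
  apply PySem.Dict.ext
  rw [items_codes _ _ hnd', PySem.Dict.items_insert_of_not_contains _ _ hcont,
      items_codes f seen hnd, PySem.List.enumerate_append]
  simp

theorem get?_codes {ν : Type} (f : Int → ν) (seen : List String) (hnd : seen.Nodup) (t : String) :
    (codes f seen).get? t
      = if t ∈ seen then some (f (seen.idxOf t)) else none := by
  induction seen using List.reverseRecOn with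
  | nil => simp [codes, PySem.Dict.ofList, PySem.Dict.update, PySem.Dict.get?,
      PySem.Dict.empty, PySem.List.enumerate]
  | append_singleton seen s ih =>
    have hnd1 := hnd
    simp [List.nodup_append] at hnd1
    have hs : s ∉ seen := fun h => hnd1.2 s h rfl
    have hnd0 : seen.Nodup := hnd1.1
    rw [codes_snoc f seen s hs hnd0, PySem.Dict.get?_insert, ih hnd0]
    by_cases hts : t = s
    · subst hts
      have : List.idxOf t (seen ++ [t]) = seen.length := by
        rw [List.idxOf_append_of_notMem hs]; simp
      simp [this, hs]
    · have hmem : t ∈ seen ++ [s] ↔ t ∈ seen := by simp [hts]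
      by_cases htm : t ∈ seen
      · rw [List.idxOf_append_of_mem htm]
        simp [hts, htm, hmem]
      · simp [hts, htm, hmem]

theorem getD_codes {ν : Type} (f : Int → ν) (d : ν) (seen : List String) (hnd : seen.Nodup)
    (t : String) (ht : t ∈ seen) :
    (codes f seen).getD t d = f (seen.idxOf t) := by
  rw [PySem.Dict.getD_eq_get?_getD, get?_codes f seen hnd t]
  simp [ht]

theorem update_append (xs : List String) : ∀ (seen : List String),
    ∃ t, PySem.Set.update seen xs = seen ++ t := by
  induction xs with
  | nil => intro seen; exact ⟨[], by simp [PySem.Set.update]⟩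
  | cons x xs ih =>
    intro seen
    have hstep : PySem.Set.update seen (x :: xs) = PySem.Set.update (PySem.Set.add seen x) xs := rfl
    by_cases hx : x ∈ seen
    · obtain ⟨t, ht⟩ := ih seen
      exact ⟨t, by rw [hstep, PySem.Set.add_of_mem hx]; exact ht⟩
    · obtain ⟨t, ht⟩ := ih (seen ++ [x])
      refine ⟨x :: t, ?_⟩
      rw [hstep, PySem.Set.add_of_not_mem hx, ht]
      simp

theorem length_le_update (seen xs : List String) :
    seen.length ≤ (PySem.Set.update seen xs).length := by
  obtain ⟨t, ht⟩ := update_append xs seen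
  simp [ht]

theorem idxOf_update_of_mem (seen xs : List String) (t : String) (ht : t ∈ seen) :
    (PySem.Set.update seen xs).idxOf t = seen.idxOf t := by
  obtain ⟨u, hu⟩ := update_append xs seen
  rw [hu, List.idxOf_append_of_mem ht]

-- first-occurrence order is exactly increasing order of first positions
theorem pairwise_idxOf (keys : List String) :
    (PySem.Set.ofList keys).Pairwise (fun a b => keys.idxOf a < keys.idxOf b) := by
  induction keys using List.reverseRecOn with
  | nil => simp [PySem.Set.ofList]
  | append_singleton keys x ih =>
    rw [PySem.Set.ofList_append_singleton]
    by_cases hx : x ∈ PySem.Set.ofList keys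
    · rw [PySem.Set.add_of_mem hx]
      refine ih.imp_of_mem ?_
      intro a b ha hb h
      rw [List.idxOf_append_of_mem (by rwa [← PySem.Set.mem_ofList (xs := keys)]),
          List.idxOf_append_of_mem (by rwa [← PySem.Set.mem_ofList (xs := keys)])]
      exact h
    · rw [PySem.Set.add_of_not_mem hx]
      have hxk : x ∉ keys := by rwa [PySem.Set.mem_ofList] at hx
      rw [List.pairwise_append]
      refine ⟨ih.imp_of_mem ?_, by simp, ?_⟩
      · intro a b ha hb h
        rw [List.idxOf_append_of_mem (by rwa [← PySem.Set.mem_ofList (xs := keys)]),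
            List.idxOf_append_of_mem (by rwa [← PySem.Set.mem_ofList (xs := keys)])]
        exact h
      · intro a ha b hb
        rw [List.mem_singleton] at hb
        subst hb
        have hak : a ∈ keys := by rwa [← PySem.Set.mem_ofList (xs := keys)]
        rw [List.idxOf_append_of_mem hak, List.idxOf_append_of_notMem hxk]
        have := List.idxOf_lt_length_of_mem hak
        simp
        omega

theorem idxOf?_eq_some_of_mem (keys : List String) (a : String) (h : a ∈ keys) :
    List.idxOf? a keys = some (List.idxOf a keys) := by
  induction keys with
  | nil => simp at h
  | cons x xs ih =>
    by_cases hx : x = a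
    · subst hx; simp [List.idxOf?_cons]
    · simp at h
      rcases h with h | h
      · exact absurd h.symm hx
      · simp [List.idxOf?_cons, hx, ih h]

-- B's sort by first position returns the symbols in first-occurrence (dedup) order
theorem sorted_eq_dedup (keys : List String) :
    PySem.List.sorted (PySem.Set.ofList keys)
        (fun k => (PySem.List.index? keys k).getD 0) false
      = PySem.Set.ofList keys := by
  apply PySem.List.sorted_eq_of_perm_of_pairwise_lt _ _ _ (List.Perm.refl _)
  refine (pairwise_idxOf keys).imp_of_mem ?_
  intro a b ha hb h
  have hak : a ∈ keys := by rwa [← PySem.Set.mem_ofList (xs := keys)]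
  have hbk : b ∈ keys := by rwa [← PySem.Set.mem_ofList (xs := keys)]
  rw [PySem.List.index?_eq_idxOf?, PySem.List.index?_eq_idxOf?,
      idxOf?_eq_some_of_mem keys a hak, idxOf?_eq_some_of_mem keys b hbk]
  simpa using h

-- the loop invariant of A's fold: state after processing a prefix with distinct strings `seen`
theorem loopA (rest : List Int) : ∀ (seen : List String) (out : List Char),
    seen.Nodup →
    65 + (PySem.Set.update seen (rest.map PySem.Int.toStr)).length ≤ 55296 →
    rest.foldl isoStepA (out, Char.ofNat (65 + seen.length),
        codes (fun i => Char.ofNat (65 + i.toNat)) seen)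
      = (out ++ rest.map (fun r =>
            Char.ofNat (65 + (PySem.Set.update seen (rest.map PySem.Int.toStr)).idxOf (PySem.Int.toStr r))),
         Char.ofNat (65 + (PySem.Set.update seen (rest.map PySem.Int.toStr)).length),
         codes (fun i => Char.ofNat (65 + i.toNat)) (PySem.Set.update seen (rest.map PySem.Int.toStr))) := by
  induction rest with
  | nil => intro seen out _ _; simp [PySem.Set.update]
  | cons r rest ih =>
    intro seen out hnd hbound
    have hstep : PySem.Set.update seen ((r :: rest).map PySem.Int.toStr)
        = PySem.Set.update (PySem.Set.add seen (PySem.Int.toStr r)) (rest.map PySem.Int.toStr) := rfl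
    set s := PySem.Int.toStr r with hsdef
    set f : Int → Char := fun i => Char.ofNat (65 + i.toNat) with hfdef
    by_cases hmem : s ∈ seen
    · -- old rune: else branch
      have hadd : PySem.Set.add seen s = seen := PySem.Set.add_of_mem hmem
      have hupd : PySem.Set.update seen ((r :: rest).map PySem.Int.toStr)
          = PySem.Set.update seen (rest.map PySem.Int.toStr) := by rw [hstep, hadd]
      have hget : (PySem.Dict.get? (codes f seen) s).isNone = false := by
        rw [get?_codes f seen hnd s]; simp [hmem]
      have hchar : (PySem.Set.update seen (rest.map PySem.Int.toStr)).idxOf s = seen.idxOf s :=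
        idxOf_update_of_mem seen _ s hmem
      rw [List.foldl_cons]
      show List.foldl isoStepA (isoStepA (out, Char.ofNat (65 + seen.length), codes f seen) r) rest = _
      rw [show isoStepA (out, Char.ofNat (65 + seen.length), codes f seen) r
          = (out ++ [PySem.Dict.getD (codes f seen) s 'A'], Char.ofNat (65 + seen.length), codes f seen) by
        simp only [isoStepA, ← hsdef, hget]; simp]
      rw [ih seen _ hnd (by rw [hupd] at hbound; exact hbound)]
      rw [hupd, getD_codes f 'A' seen hnd s hmem]
      simp [← hsdef, hfdef]
      rw [hchar]
    · -- new rune: then branch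
      have hadd : PySem.Set.add seen s = seen ++ [s] := PySem.Set.add_of_not_mem hmem
      have hupd : PySem.Set.update seen ((r :: rest).map PySem.Int.toStr)
          = PySem.Set.update (seen ++ [s]) (rest.map PySem.Int.toStr) := by rw [hstep, hadd]
      have hnd' : (seen ++ [s]).Nodup := by
        simp [List.nodup_append, hnd]
        exact fun a ha h => hmem (h ▸ ha)
      have hbound' : 65 + (PySem.Set.update (seen ++ [s]) (rest.map PySem.Int.toStr)).length ≤ 55296 := by
        rw [hupd] at hbound; exact hbound
      have hvalid : 65 + seen.length < 55296 := by
        have h1 := length_le_update (seen ++ [s]) (rest.map PySem.Int.toStr)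
        simp at h1; omega
      have hget : (PySem.Dict.get? (codes f seen) s).isNone = true := by
        rw [get?_codes f seen hnd s]; simp [hmem]
      have hins : PySem.Dict.insert (codes f seen) s (Char.ofNat (65 + seen.length))
          = codes f (seen ++ [s]) := by
        rw [codes_snoc f seen s hmem hnd]
        congr 1
      have hord : (Char.ofNat (65 + seen.length)).toNat + 1 = 65 + (seen ++ [s]).length := by
        rw [toNat_ofNat_valid _ hvalid, List.length_append]; simp; omega
      have hidx : (PySem.Set.update (seen ++ [s]) (rest.map PySem.Int.toStr)).idxOf s
          = seen.length := by
        rw [idxOf_update_of_mem (seen ++ [s]) _ s (by simp),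
            List.idxOf_append_of_notMem hmem]
        simp
      rw [List.foldl_cons]
      have hA : isoStepA (out, Char.ofNat (65 + seen.length), codes f seen) r
          = (out ++ [Char.ofNat (65 + seen.length)], Char.ofNat (65 + (seen ++ [s]).length),
             codes f (seen ++ [s])) := by
        simp only [isoStepA, ← hsdef, hget, if_true]
        rw [PySem.Dict.getD_insert_self, hord, hins]
      rw [hA, ih (seen ++ [s]) _ hnd' hbound']
      rw [hupd]
      simp [← hsdef]
      rw [hidx]

-- B's result, characterised: the letter at each position is the rank of its symbol in dedup order
theorem alt_eq (text : List Int) :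
    isomorph_alt text
      = String.ofList (text.map (fun r =>
          Char.ofNat (65 + (PySem.Set.ofList (text.map PySem.Int.toStr)).idxOf (PySem.Int.toStr r)))) := by
  simp only [isomorph_alt]
  rw [sorted_eq_dedup]
  have hrank : PySem.Dict.ofList
      ((PySem.List.enumerate (PySem.Set.ofList (text.map PySem.Int.toStr))).map (fun p => (p.2, p.1)))
      = codes (fun i => i) (PySem.Set.ofList (text.map PySem.Int.toStr)) := rfl
  rw [hrank, List.map_map]
  congr 1
  apply List.map_congr_left
  intro r hr
  have hmem : PySem.Int.toStr r ∈ PySem.Set.ofList (text.map PySem.Int.toStr) := by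
    rw [PySem.Set.mem_ofList]
    exact List.mem_map_of_mem hr
  simp only [Function.comp]
  rw [getD_codes (fun i => i) 0 _ (PySem.Set.nodup_ofList _) _ hmem]
  simp

-- ===== VERDICT (by name: the statement is the Claim_ definition above) =====
theorem isomorph_spec : Claim_equal_isomorph := by
  intro text _ hpre
  unfold Spec_isomorph isomorph
  rw [alt_eq]
  have hupd0 : PySem.Set.update [] (text.map PySem.Int.toStr)
      = PySem.Set.ofList (text.map PySem.Int.toStr) := rfl
  have hbound : 65 + (PySem.Set.update [] (text.map PySem.Int.toStr)).length ≤ 55296 := by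
    unfold Pre_isomorph at hpre
    rw [PySem.List.dedup_eq_ofList, ← hupd0] at hpre
    omega
  have hstart : ((([] : List Char), 'A', (PySem.Dict.empty : PySem.Dict String Char)))
      = (([] : List Char), Char.ofNat (65 + ([] : List String).length),
         codes (fun i => Char.ofNat (65 + i.toNat)) []) := by
    constructor
  rw [hstart, loopA text [] [] (by simp) (by simpa using hbound), hupd0]
  simp
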